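-- pv_equiv track=rewrite | github.com/brodybennett/Rulebook-Viewer-Program | VSCODE MD Files/tools/lint_roll_syntax.py | split_semicolon_clauses
-- ===== SOURCE A (Python) =====
-- from typing import Any, Dict, Iterable, List, Optional, Sequence, Tuple
--
-- def split_semicolon_clauses(snippet: str) -> List[Tuple[str, int]]:
--     clauses: List[Tuple[str, int]] = []
--     start = 0
--     for idx, ch in enumerate(snippet):
--         if ch != ";":
--             continue
--         raw = snippet[start:idx]
--         stripped = raw.strip()
--         if stripped:
--             leading = len(raw) - len(raw.lstrip())
--             clauses.append((stripped, start + leading + 1))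
--         start = idx + 1
--
--     raw = snippet[start:]
--     stripped = raw.strip()
--     if stripped:
--         leading = len(raw) - len(raw.lstrip())
--         clauses.append((stripped, start + leading + 1))
--     return clauses
-- ===== SOURCE B (Python) =====
-- def split_semicolon_clauses(snippet):
--     clauses = []
--     offset = 0
--     for part in snippet.split(';'):
--         stripped = part.strip()
--         if stripped:
--             leading = len(part) - len(part.lstrip())
--             clauses.append((stripped, offset + leading + 1))
--         offset += len(part) + 1
--     return clauses
-- ===== Notes on version B (the rewrite author's own statement) =====
-- stated objective: simpler
-- what changed: Replaces A's character-by-character scan that tracks a start index and slices out each clause at every semicolon with a single str.split on the semicolon separator followed by one pass over the parts maintaining a running offset.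
import Mathlib
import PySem

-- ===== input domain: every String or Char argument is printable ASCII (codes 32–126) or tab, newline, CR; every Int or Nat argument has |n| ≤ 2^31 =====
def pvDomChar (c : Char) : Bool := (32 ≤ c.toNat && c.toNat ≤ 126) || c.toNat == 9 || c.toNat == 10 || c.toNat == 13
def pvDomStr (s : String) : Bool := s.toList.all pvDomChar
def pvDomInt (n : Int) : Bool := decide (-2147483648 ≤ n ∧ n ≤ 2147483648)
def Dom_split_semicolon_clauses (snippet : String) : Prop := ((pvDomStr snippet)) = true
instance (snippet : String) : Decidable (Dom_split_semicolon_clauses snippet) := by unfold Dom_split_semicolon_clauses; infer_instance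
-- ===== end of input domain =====

-- B replaces A's character-by-character scan (tracking a start index and slicing) by one
-- pass over the clauses produced by split(';') with a running offset: objective 'simpler'.

-- ===== PORT A =====
-- loop body of A's `for idx, ch in enumerate(snippet)` (state = (clauses, start))
def stepA (cs0 : List Char) (s : List (String × Int) × Int) (p : Int × Char) :
    List (String × Int) × Int :=
  if p.2 ≠ ';' then s
  else
    let raw := PySem.List.slice cs0 (some s.2) (some p.1)
    let stripped := PySem.Chars.strip raw
    let clauses :=
      if stripped ≠ [] then
        s.1 ++ [(String.ofList stripped,
                 s.2 + ((raw.length : Int) - ((PySem.Chars.lstrip raw).length : Int)) + 1)]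
      else s.1
    (clauses, p.1 + 1)

-- A's code after the loop (the trailing `snippet[start:]` clause)
def tailA (cs0 : List Char) (st : List (String × Int) × Int) : List (String × Int) :=
  let raw := PySem.List.slice cs0 (some st.2) none
  let stripped := PySem.Chars.strip raw
  if stripped ≠ [] then
    st.1 ++ [(String.ofList stripped,
              st.2 + ((raw.length : Int) - ((PySem.Chars.lstrip raw).length : Int)) + 1)]
  else st.1

def split_semicolon_clauses (snippet : String) : List (String × Int) :=
  let cs := snippet.toList
  tailA cs ((PySem.List.enumerate cs 0).foldl (stepA cs) ([], 0))

-- ===== PORT B =====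
-- loop body of B's `for part in snippet.split(';')` (state = (clauses, offset))
def stepB (s : List (String × Int) × Int) (part : List Char) : List (String × Int) × Int :=
  let stripped := PySem.Chars.strip part
  let clauses :=
    if stripped ≠ [] then
      s.1 ++ [(String.ofList stripped,
               s.2 + ((part.length : Int) - ((PySem.Chars.lstrip part).length : Int)) + 1)]
    else s.1
  (clauses, s.2 + part.length + 1)

def split_semicolon_clauses_alt (snippet : String) : List (String × Int) :=
  ((List.splitOn ';' snippet.toList).foldl stepB ([], 0)).1

-- ===== PRECONDITION & SPEC =====
def Spec_split_semicolon_clauses (snippet : String) (out : List (String × Int)) : Prop := out = split_semicolon_clauses_alt snippet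
instance (snippet : String) (out : List (String × Int)) : Decidable (Spec_split_semicolon_clauses snippet out) := by unfold Spec_split_semicolon_clauses; infer_instance

-- ===== CLAIM (what is proved, stated in full; the proofs are below) =====
def Claim_equal_split_semicolon_clauses : Prop := ∀ (snippet : String), Dom_split_semicolon_clauses snippet → Spec_split_semicolon_clauses snippet (split_semicolon_clauses snippet)

-- ===== LEMMAS AND PROOFS =====

-- A's loop with indices offset by n, followed by its tail step (proof-side view of A)
def Afull (cs0 l : List Char) (n : Nat) (acc : List (String × Int)) : List (String × Int) :=
  tailA cs0 ((PySem.List.enumerate l (n : Int)).foldl (stepA cs0) (acc, (n : Int)))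

lemma foldA_skip (cs0 : List Char) (m : List Char) (hm : (';' : Char) ∉ m) :
    ∀ (k : Int) (st : List (String × Int) × Int),
      (PySem.List.enumerate m k).foldl (stepA cs0) st = st := by
  induction m with
  | nil => intro k st; simp [PySem.List.enumerate]
  | cons c t ih =>
    intro k st
    have hc : c ≠ ';' := by intro h; exact hm (h ▸ List.mem_cons_self)
    have ht : (';' : Char) ∉ t := fun h => hm (List.mem_cons_of_mem _ h)
    rw [PySem.List.enumerate_cons, List.foldl_cons]
    rw [show stepA cs0 st (k, c) = st by simp [stepA, hc]]
    exact ih ht _ _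

lemma splitOn_no (l : List Char) (h : (';' : Char) ∉ l) : List.splitOn ';' l = [l] := by
  induction l with
  | nil => simp
  | cons c t ih =>
    have hc : c ≠ ';' := by intro hh; exact h (hh ▸ List.mem_cons_self)
    have ht : (';' : Char) ∉ t := fun hh => h (List.mem_cons_of_mem _ hh)
    rw [List.splitOn, List.splitOnP_cons]
    rw [if_neg (by simp [hc] : ¬ ((c == ';') = true))]
    rw [show List.splitOnP (· == ';') t = List.splitOn ';' t from rfl, ih ht]
    rfl

lemma splitOn_first (m r : List Char) (h : (';' : Char) ∉ m) :
    List.splitOn ';' (m ++ ';' :: r) = m :: List.splitOn ';' r := by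
  induction m with
  | nil => rw [List.nil_append, List.splitOn, List.splitOnP_cons]; simp; rfl
  | cons c t ih =>
    have hc : c ≠ ';' := by intro hh; exact h (hh ▸ List.mem_cons_self)
    have ht : (';' : Char) ∉ t := fun hh => h (List.mem_cons_of_mem _ hh)
    rw [List.cons_append, List.splitOn, List.splitOnP_cons]
    rw [if_neg (by simp [hc] : ¬ ((c == ';') = true))]
    rw [show List.splitOnP (· == ';') (t ++ ';' :: r) = List.splitOn ';' (t ++ ';' :: r) from rfl,
        ih ht]
    rfl

lemma first_semi (l : List Char) (h : (';' : Char) ∈ l) :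
    ∃ m r, l = m ++ ';' :: r ∧ (';' : Char) ∉ m := by
  induction l with
  | nil => cases h
  | cons c t ih =>
    by_cases hc : c = ';'
    · exact ⟨[], t, by simp [hc], by simp⟩
    · have ht : (';' : Char) ∈ t := by
        rcases List.mem_cons.mp h with h1 | h2
        · exact absurd h1.symm hc
        · exact h2
      obtain ⟨m, r, hl, hm⟩ := ih ht
      exact ⟨c :: m, r, by simp [hl], by simp [hm, Ne.symm hc]⟩

lemma base_case (cs0 l : List Char) (n : Nat) (acc : List (String × Int))
    (hns : (';' : Char) ∉ l) (hd : List.drop n cs0 = l) :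
    Afull cs0 l n acc = ((List.splitOn ';' l).foldl stepB (acc, (n : Int))).1 := by
  unfold Afull
  rw [foldA_skip cs0 l hns, splitOn_no l hns]
  simp only [List.foldl_cons, List.foldl_nil]
  show tailA cs0 (acc, (n : Int)) = (stepB (acc, (n : Int)) l).1
  simp only [tailA, stepB, PySem.List.slice_from_natCast, hd]

lemma main_lemma (cs0 : List Char) :
    ∀ (N : Nat) (l : List Char), l.length ≤ N → ∀ (n : Nat) (acc : List (String × Int)),
      List.drop n cs0 = l →
      Afull cs0 l n acc = ((List.splitOn ';' l).foldl stepB (acc, (n : Int))).1 := by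
  intro N
  induction N with
  | zero =>
    intro l hl n acc hd
    have : l = [] := List.eq_nil_of_length_eq_zero (Nat.le_zero.mp hl)
    exact base_case cs0 l n acc (by simp [this]) hd
  | succ N ih =>
    intro l hl n acc hd
    by_cases h : (';' : Char) ∈ l
    · obtain ⟨m, r, hlr, hm⟩ := first_semi l h
      subst hlr
      have hrlen : r.length ≤ N := by simp at hl; omega
      have hdr : List.drop (n + m.length + 1) cs0 = r := by
        have h2 := congrArg (List.drop (m.length + 1)) hd
        rw [List.drop_drop] at h2
        rw [show m ++ ';' :: r = (m ++ [';']) ++ r by simp] at h2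
        rw [show m.length + 1 = (m ++ [';']).length by simp] at h2
        rw [List.drop_left] at h2
        have h3 : (m ++ [';']).length = m.length + 1 := by simp
        rw [h3] at h2
        rw [show n + m.length + 1 = n + (m.length + 1) by omega]
        exact h2
      unfold Afull
      rw [PySem.List.enumerate_append, List.foldl_append, foldA_skip cs0 m hm,
          PySem.List.enumerate_cons, List.foldl_cons]
      have hraw : PySem.List.slice cs0 (some (n : Int)) (some ((n : Int) + (m.length : Int))) = m := by
        rw [PySem.List.slice_natCast_add, hd, List.take_left]
      have hstep : stepA cs0 (acc, (n : Int)) (((n : Int) + (m.length : Int)), ';')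
          = stepB (acc, (n : Int)) m := by
        simp only [stepA, stepB, hraw]; simp
      rw [hstep]
      have hsnd : (stepB (acc, (n : Int)) m)
          = ((stepB (acc, (n : Int)) m).1, ((n + m.length + 1 : Nat) : Int)) := by
        refine Prod.ext rfl ?_
        simp only [stepB]; push_cast; ring
      have hsnd2 : (stepB (acc, (n : Int)) m)
          = ((stepB (acc, (n : Int)) m).1, ((n : Int) + (m.length : Int) + 1)) := by
        refine Prod.ext rfl ?_
        simp only [stepB]
      rw [splitOn_first m r hm, List.foldl_cons]
      calc tailA cs0 ((PySem.List.enumerate r ((n : Int) + (m.length : Int) + 1)).foldl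
              (stepA cs0) (stepB (acc, (n : Int)) m))
          = Afull cs0 r (n + m.length + 1) (stepB (acc, (n : Int)) m).1 := by
            unfold Afull
            rw [show ((n + m.length + 1 : Nat) : Int) = (n : Int) + (m.length : Int) + 1 by
                  push_cast; ring, ← hsnd2]
        _ = ((List.splitOn ';' r).foldl stepB
              ((stepB (acc, (n : Int)) m).1, ((n + m.length + 1 : Nat) : Int))).1 :=
            ih r hrlen _ _ hdr
        _ = ((List.splitOn ';' r).foldl stepB (stepB (acc, (n : Int)) m)).1 := by rw [← hsnd]
    · exact base_case cs0 l n acc h hd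

-- ===== VERDICT (by name: the statement is the Claim_ definition above) =====
theorem split_semicolon_clauses_spec : Claim_equal_split_semicolon_clauses := by
  intro snippet _
  unfold Spec_split_semicolon_clauses split_semicolon_clauses split_semicolon_clauses_alt
  have h := main_lemma snippet.toList snippet.toList.length snippet.toList (le_refl _) 0 [] (by simp)
  simpa [Afull] using h
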